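-- pv_equiv track=rewrite | github.com/JacobHarrison/Advent-of-Code-2024 | Day10/Star1.py | dfs
-- ===== SOURCE A (Python) =====
-- def dfs(height_map, x, y, visited):
--     stack = [(x, y, 0)]
--     reachable_nines = set()
--
--     while stack:
--         cx, cy, current_height = stack.pop()
--
--         if (cx, cy) in visited:
--             continue
--         visited.add((cx, cy))
--
--         if height_map[cx][cy] == 9:
--             reachable_nines.add((cx, cy))
--
--         for dx, dy in [(-1, 0), (1, 0), (0, -1), (0, 1)]:
--             new_x, new_y = cx + dx, cy + dy
--             if 0 <= new_x < len(height_map) and 0 <= new_y < len(height_map[0]) and (new_x, new_y) not in visited and height_map[new_x][new_y] == current_height + 1: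
--                 new_height = height_map[new_x][new_y]
--                 stack.append((new_x, new_y, new_height))
--
--     return len(reachable_nines)
-- ===== SOURCE B (Python) =====
-- def dfs(height_map, x, y, visited):
--     # Recursive DFS instead of an explicit stack; counts newly reached height-9
--     # cells via a shared set. Mutates `visited` exactly like the original.
--     nines = set()
--
--     def visit(cx, cy, expected):
--         visited.add((cx, cy))
--         if height_map[cx][cy] == 9:
--             nines.add((cx, cy))
--         for dx, dy in ((-1, 0), (1, 0), (0, -1), (0, 1)):
--             nx, ny = cx + dx, cy + dy
--             if 0 <= nx < len(height_map) and 0 <= ny < len(height_map[0]) \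
--                     and (nx, ny) not in visited \
--                     and height_map[nx][ny] == expected + 1:
--                 visit(nx, ny, height_map[nx][ny])
--
--     if (x, y) not in visited:
--         visit(x, y, 0)
--     return len(nines)
-- ===== Notes on version B (the rewrite author's own statement) =====
-- stated objective: alternative
-- what changed: Replaces the explicit stack loop (entries carrying heights, visited checked at pop time) by a recursive DFS helper that marks a cell, records height-9 cells in a shared set, and recurses directly into each qualifying neighbour; no stack entries or carried heights are materialised.
-- outside the precondition, e.g. on dfs([[5, 5], [7]], 0, 0, set()): A returns 0, B returns 0
import Mathlib
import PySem

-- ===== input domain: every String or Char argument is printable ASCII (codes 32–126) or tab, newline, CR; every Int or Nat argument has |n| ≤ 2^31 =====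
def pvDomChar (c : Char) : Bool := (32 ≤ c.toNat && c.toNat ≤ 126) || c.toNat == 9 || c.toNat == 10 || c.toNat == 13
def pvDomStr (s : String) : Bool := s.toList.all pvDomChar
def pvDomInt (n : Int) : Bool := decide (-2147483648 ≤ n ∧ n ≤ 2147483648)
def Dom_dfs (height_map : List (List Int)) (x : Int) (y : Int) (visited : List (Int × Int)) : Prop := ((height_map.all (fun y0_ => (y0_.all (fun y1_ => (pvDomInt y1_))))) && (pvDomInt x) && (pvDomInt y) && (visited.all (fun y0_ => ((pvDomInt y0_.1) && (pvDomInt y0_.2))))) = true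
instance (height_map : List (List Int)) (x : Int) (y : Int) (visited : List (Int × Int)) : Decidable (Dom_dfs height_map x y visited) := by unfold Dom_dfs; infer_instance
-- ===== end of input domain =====

-- B replaces A's explicit stack loop (entries carrying heights, pop-time visited check) by a
-- recursive DFS helper; in Python both mutate the caller's `visited` set identically — the
-- equivalence proved here is about the return value.

-- shared transliteration helper: Python's `height_map[i][j]` (none = IndexError)
def hgt? (M : List (List Int)) (c : Int × Int) : Option Int :=
  (PySem.List.pyGet? M c.1).bind fun row => PySem.List.pyGet? row c.2

-- Python's `0 <= i < len(height_map) and 0 <= j < len(height_map[0])`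
def inGrid (M : List (List Int)) (c : Int × Int) : Bool :=
  decide (0 ≤ c.1) && decide (c.1 < (M.length : Int)) &&
  decide (0 ≤ c.2) && decide (c.2 < ((M.headD []).length : Int))

-- ===== PORT A =====
-- A's Python stack appends/pops at the right end; here the stack is kept top-first, so
-- popping is taking the head and pushing the four candidates in order is prepending their
-- reverse.  The Nat fuel only makes the while-loop total; it is provably never exhausted.
def dfsPushes (M : List (List Int)) (c : Int × Int) (h : Int) (vis : PySem.Set (Int × Int)) :
    List ((Int × Int) × Int) :=
  [((-1 : Int), (0 : Int)), (1, 0), (0, -1), (0, 1)].filterMap fun d =>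
    let n := (c.1 + d.1, c.2 + d.2)
    if inGrid M n ∧ n ∉ vis ∧ hgt? M n = some (h + 1) then some (n, (hgt? M n).getD 0) else none

def dfsLoop (M : List (List Int)) :
    Nat → List ((Int × Int) × Int) → PySem.Set (Int × Int) → PySem.Set (Int × Int) →
    PySem.Set (Int × Int) × PySem.Set (Int × Int)
  | _, [], vis, nines => (vis, nines)
  | 0, _ :: _, vis, nines => (vis, nines)
  | f + 1, (c, h) :: rest, vis, nines =>
    if c ∈ vis then dfsLoop M f rest vis nines
    else
      dfsLoop M f ((dfsPushes M c h (PySem.Set.add vis c)).reverse ++ rest)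
        (PySem.Set.add vis c)
        (if hgt? M c = some 9 then PySem.Set.add nines c else nines)

def dfs (height_map : List (List Int)) (x : Int) (y : Int) (visited : List (Int × Int)) : Int :=
  PySem.Set.len
    (dfsLoop height_map (4 * (height_map.length * (height_map.headD []).length) + 5)
      [((x, y), 0)] visited PySem.Set.empty).2

-- ===== PORT B =====
-- transliteration of Source B: recursive helper `visit` marking the cell, recording height-9
-- cells, and recursing directly into each qualifying neighbour (no stack, no carried
-- heights).  The Nat fuel only makes the recursion total; it is provably never exhausted.
mutual
def dfsVisit (M : List (List Int)) :
    Nat → (Int × Int) → Int → PySem.Set (Int × Int) × PySem.Set (Int × Int) →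
    PySem.Set (Int × Int) × PySem.Set (Int × Int)
  | 0, _, _, s => s
  | f + 1, c, expected, (vis, nines) =>
    dfsGo M f [((-1 : Int), (0 : Int)), (1, 0), (0, -1), (0, 1)] c expected
      (PySem.Set.add vis c, if hgt? M c = some 9 then PySem.Set.add nines c else nines)
termination_by f _ _ _ => (f, 0)

def dfsGo (M : List (List Int)) :
    Nat → List (Int × Int) → (Int × Int) → Int →
    PySem.Set (Int × Int) × PySem.Set (Int × Int) →
    PySem.Set (Int × Int) × PySem.Set (Int × Int)
  | _, [], _, _, s => s
  | f, d :: ds, c, expected, s =>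
    let n := (c.1 + d.1, c.2 + d.2)
    dfsGo M f ds c expected
      (if inGrid M n ∧ n ∉ s.1 ∧ hgt? M n = some (expected + 1) then
        dfsVisit M f n ((hgt? M n).getD 0) s
      else s)
termination_by f ds _ _ _ => (f, ds.length + 1)
end

def dfs_alt (height_map : List (List Int)) (x : Int) (y : Int) (visited : List (Int × Int)) : Int :=
  let fuel := height_map.length * (height_map.headD []).length + 2
  PySem.Set.len
    (if (x, y) ∈ visited then ((visited : PySem.Set (Int × Int)), (PySem.Set.empty : PySem.Set (Int × Int)))
     else dfsVisit height_map fuel (x, y) 0 (visited, PySem.Set.empty)).2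

-- ===== PRECONDITION & SPEC =====
-- Pre_ excludes exactly the inputs that can make the Python raise an IndexError: an empty
-- map or an out-of-range start cell (unless the start is already in `visited`, where A
-- returns 0 without indexing), and — more broadly than strictly necessary — maps with a row
-- shorter than row 0, on which A raises iff its walk happens to reach the short row.
def Pre_dfs (height_map : List (List Int)) (x : Int) (y : Int) (visited : List (Int × Int)) : Prop :=
  (x, y) ∈ visited ∨
    (height_map ≠ [] ∧
     (∀ r ∈ height_map, (height_map.headD []).length ≤ r.length) ∧
     -(height_map.length : Int) ≤ x ∧ x < (height_map.length : Int) ∧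
     -(((PySem.List.pyGet? height_map x).getD []).length : Int) ≤ y ∧
     y < (((PySem.List.pyGet? height_map x).getD []).length : Int))
instance (height_map : List (List Int)) (x : Int) (y : Int) (visited : List (Int × Int)) : Decidable (Pre_dfs height_map x y visited) := by unfold Pre_dfs; infer_instance

def pvWitness_dfs : List (List Int) × Int × Int × (List (Int × Int)) :=
  ([[0, 1], [9, 2]], 0, 0, [])

def Spec_dfs (height_map : List (List Int)) (x : Int) (y : Int) (visited : List (Int × Int)) (out : Int) : Prop := out = dfs_alt height_map x y visited
instance (height_map : List (List Int)) (x : Int) (y : Int) (visited : List (Int × Int)) (out : Int) : Decidable (Spec_dfs height_map x y visited out) := by unfold Spec_dfs; infer_instance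

-- ===== CLAIM (what is proved, stated in full; the proofs are below) =====
def Claim_equal_dfs : Prop := ∀ (height_map : List (List Int)) (x : Int) (y : Int) (visited : List (Int × Int)), Dom_dfs height_map x y visited → Pre_dfs height_map x y visited → Spec_dfs height_map x y visited (dfs height_map x y visited)

-- ===== LEMMAS AND PROOFS =====

-- the neighbour candidates of a cell, ignoring the visited pruning
def succE (M : List (List Int)) (c : Int × Int) (e : Int) : List (Int × Int) :=
  [((-1 : Int), (0 : Int)), (1, 0), (0, -1), (0, 1)].filterMap fun d =>
    let n := (c.1 + d.1, c.2 + d.2)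
    if inGrid M n ∧ hgt? M n = some (e + 1) then some n else none

-- reachability from a cell along +1-height steps, through cells avoiding `v`
inductive Rch (M : List (List Int)) (v : (Int × Int) → Prop) : (Int × Int) → (Int × Int) → Prop
  | refl (c : Int × Int) : ¬ v c → Rch M v c c
  | step (c n u : Int × Int) : ¬ v c → n ∈ succE M c ((hgt? M c).getD 0) →
      Rch M v n u → Rch M v c u

theorem Rch_not_avoid {M v c u} (h : Rch M v c u) : ¬ v c := by
  cases h <;> assumption

theorem Rch_mono {M} {v w : (Int × Int) → Prop} (hvw : ∀ z, v z → w z) {a u}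
    (h : Rch M w a u) : Rch M v a u := by
  induction h with
  | refl c hc => exact Rch.refl c (fun h => hc (hvw _ h))
  | step c n u hc hn _ ih => exact Rch.step c n u (fun h => hc (hvw _ h)) hn ih

theorem Rch_congr {M} {v w : (Int × Int) → Prop} (hvw : ∀ z, v z ↔ w z) {a u} :
    Rch M v a u ↔ Rch M w a u :=
  ⟨Rch_mono (fun z hz => (hvw z).2 hz), Rch_mono (fun z hz => (hvw z).1 hz)⟩

theorem Rch_trans {M v} {a b u : Int × Int} (h₁ : Rch M v a b) (h₂ : Rch M v b u) :
    Rch M v a u := by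
  induction h₁ with
  | refl => exact h₂
  | step c n b hc hn _ ih => exact Rch.step c n u hc hn (ih h₂)

-- splitting a reachability derivation at a distinguished cell c
theorem Rch_split {M v} {a u : Int × Int} (h : Rch M v a u) (c : Int × Int) :
    Rch M (fun z => z = c ∨ v z) a u ∨ u = c ∨
      ∃ n ∈ succE M c ((hgt? M c).getD 0), Rch M (fun z => z = c ∨ v z) n u := by
  induction h with
  | refl a ha =>
    by_cases hac : a = c
    · exact Or.inr (Or.inl hac)
    · exact Or.inl (Rch.refl a (by rintro (h | h) <;> [exact hac h; exact ha h]))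
  | step a n u ha hn hrec ih =>
    rcases ih with ih | ih | ih
    · by_cases hac : a = c
      · subst hac; exact Or.inr (Or.inr ⟨n, hn, ih⟩)
      · exact Or.inl (Rch.step a n u (by rintro (h | h) <;> [exact hac h; exact ha h]) hn ih)
    · exact Or.inr (Or.inl ih)
    · exact Or.inr (Or.inr ih)

theorem Rch_unfold {M v} {c u : Int × Int} (hc : ¬ v c) :
    Rch M v c u ↔ (u = c ∨
      ∃ n ∈ succE M c ((hgt? M c).getD 0), Rch M (fun z => z = c ∨ v z) n u) := by
  constructor
  · intro h
    rcases Rch_split h c with h' | h' | h'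
    · exact absurd (Or.inl rfl) (Rch_not_avoid h')
    · exact Or.inl h'
    · exact Or.inr h'
  · rintro (rfl | ⟨n, hn, hr⟩)
    · exact Rch.refl u hc
    · exact Rch.step c n u hc hn (Rch_mono (fun z hz => Or.inr hz) hr)

-- absorbing an enlarged avoid set w = v ∪ (reachable-from-r)
theorem Rch_absorb {M} {v w : (Int × Int) → Prop} {r : Int × Int}
    (hw : ∀ z, w z ↔ (v z ∨ Rch M v r z)) {a u} (h : Rch M v a u) :
    Rch M w a u ∨ Rch M v r u := by
  induction h with
  | refl a ha =>
    by_cases hwa : w a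
    · rcases (hw a).1 hwa with h | h
      · exact absurd h ha
      · exact Or.inr h
    · exact Or.inl (Rch.refl a hwa)
  | step a n u ha hn hrec ih =>
    rcases ih with ih | ih
    · by_cases hwa : w a
      · rcases (hw a).1 hwa with h | h
        · exact absurd h ha
        · exact Or.inr (Rch_trans h (Rch.step a n u ha hn hrec))
      · exact Or.inl (Rch.step a n u hwa hn ih)
    · exact Or.inr ih

theorem mem_succE {M c e n} :
    n ∈ succE M c e ↔
      ∃ d ∈ [((-1 : Int), (0 : Int)), (1, 0), (0, -1), (0, 1)],
        (inGrid M (c.1 + d.1, c.2 + d.2) = true ∧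
          hgt? M (c.1 + d.1, c.2 + d.2) = some (e + 1)) ∧ n = (c.1 + d.1, c.2 + d.2) := by
  simp only [succE, List.mem_filterMap]
  constructor
  · rintro ⟨d, hd, hif⟩
    split_ifs at hif with hcond
    · cases hif; exact ⟨d, hd, hcond, rfl⟩
  · rintro ⟨d, hd, hcond, rfl⟩
    exact ⟨d, hd, by simp [hcond.1, hcond.2]⟩

theorem mem_dfsPushes {M c h vis p} :
    p ∈ dfsPushes M c h vis ↔
      p.1 ∈ succE M c h ∧ p.1 ∉ vis ∧ p.2 = (hgt? M p.1).getD 0 := by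
  simp only [dfsPushes, List.mem_filterMap, mem_succE]
  constructor
  · rintro ⟨d, hd, hif⟩
    split_ifs at hif with hcond
    · cases hif
      exact ⟨⟨d, hd, ⟨hcond.1, hcond.2.2⟩, rfl⟩, hcond.2.1, rfl⟩
  · rintro ⟨⟨d, hd, hcond, hp⟩, hnv, hp2⟩
    obtain ⟨p1, p2⟩ := p
    simp only at hp hp2 hnv
    subst hp; subst hp2
    exact ⟨d, hd, by rw [if_pos ⟨hcond.1, hnv, hcond.2⟩]⟩

theorem succE_inGrid {M c e n} (h : n ∈ succE M c e) : inGrid M n = true := by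
  rcases mem_succE.1 h with ⟨d, _, hcond, rfl⟩
  exact hcond.1

-- the grid cells as a list, and measures counting not-yet-visited cells
def gridCells (M : List (List Int)) : List (Int × Int) :=
  ((List.range M.length).map Int.ofNat) ×ˢ ((List.range (M.headD []).length).map Int.ofNat)

theorem mem_cast_range {n : Nat} {a : Int} (h1 : 0 ≤ a) (h2 : a < n) :
    a ∈ (List.range n).map Int.ofNat := by
  refine List.mem_map.mpr ⟨a.toNat, List.mem_range.mpr (by omega), ?_⟩
  simp only [Int.ofNat_eq_natCast]; omega

theorem mem_gridCells {M n} (h : inGrid M n = true) : n ∈ gridCells M := by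
  obtain ⟨a, b⟩ := n
  simp only [inGrid, Bool.and_eq_true, decide_eq_true_eq] at h
  obtain ⟨⟨⟨h1, h2⟩, h3⟩, h4⟩ := h
  unfold gridCells
  exact List.pair_mem_product.mpr ⟨mem_cast_range h1 h2, mem_cast_range h3 h4⟩

theorem gridCells_length {M} : (gridCells M).length = M.length * (M.headD []).length := by
  unfold gridCells; rw [List.length_product]; simp

def UA (M : List (List Int)) (stack : List ((Int × Int) × Int)) (vis : List (Int × Int)) : Nat :=
  ((stack.map Prod.fst ++ gridCells M).toFinset.filter (fun z => z ∉ vis)).card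

def UB (M : List (List Int)) (x y : Int) (vis : List (Int × Int)) : Nat :=
  (((x, y) :: gridCells M).toFinset.filter (fun z => z ∉ vis)).card


theorem UA_skip {M p rest vis} : UA M rest vis ≤ UA M (p :: rest) vis := by
  apply Finset.card_le_card
  intro z hz
  simp only [Finset.mem_filter, List.mem_toFinset, List.mem_append, List.mem_map,
    List.map_cons, List.mem_cons] at hz ⊢
  exact ⟨hz.1.imp Or.inr id, hz.2⟩

theorem UA_step {M c h rest vis} (hc : c ∉ vis) :
    UA M ((dfsPushes M c h (PySem.Set.add vis c)).reverse ++ rest) (PySem.Set.add vis c) <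
      UA M ((c, h) :: rest) vis := by
  apply Finset.card_lt_card
  constructor
  · intro z hz
    rw [Finset.mem_filter, List.mem_toFinset, List.mem_append] at hz
    rw [Finset.mem_filter, List.mem_toFinset, List.mem_append]
    obtain ⟨hz1, hz2⟩ := hz
    refine ⟨?_, fun hzv => hz2 (by simp [PySem.Set.mem_add, hzv])⟩
    rcases hz1 with h' | h'
    · rcases List.mem_map.1 h' with ⟨p, hp, rfl⟩
      rcases List.mem_append.1 hp with hp' | hp'
      · exact Or.inr (mem_gridCells (succE_inGrid (mem_dfsPushes.1 (List.mem_reverse.1 hp')).1))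
      · exact Or.inl (by rw [List.map_cons, List.mem_cons]; exact Or.inr (List.mem_map_of_mem hp'))
    · exact Or.inr h'
  · intro hsub
    have hcmem : c ∈ (((c, h) :: rest).map Prod.fst ++ gridCells M).toFinset.filter
        (fun z => z ∉ vis) := by
      simp [hc]
    have := hsub hcmem
    simp only [Finset.mem_filter] at this
    exact this.2 (by simp [PySem.Set.mem_add])

theorem UA_le_grid {M} {stack : List ((Int × Int) × Int)} {vis : List (Int × Int)}
    (hs : ∀ z ∈ stack.map Prod.fst, z ∈ gridCells M) :
    UA M stack vis ≤ (gridCells M).length := by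
  calc UA M stack vis ≤ (gridCells M).toFinset.card := by
        apply Finset.card_le_card
        intro z hz
        simp only [Finset.mem_filter, List.mem_toFinset, List.mem_append] at hz ⊢
        rcases hz.1 with h | h
        · exact hs z h
        · exact h
    _ ≤ (gridCells M).length := List.toFinset_card_le _

theorem UB_sub {M x y} {vis vis' : List (Int × Int)} (hv : ∀ z, z ∈ vis → z ∈ vis') :
    UB M x y vis' ≤ UB M x y vis := by
  apply Finset.card_le_card
  intro z hz
  simp only [Finset.mem_filter] at hz ⊢
  exact ⟨hz.1, fun h => hz.2 (hv z h)⟩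

theorem UB_dec {M x y vis} {c : Int × Int} (hmem : c ∈ (x, y) :: gridCells M)
    (hc : c ∉ vis) : UB M x y (PySem.Set.add vis c) < UB M x y vis := by
  apply Finset.card_lt_card
  constructor
  · intro z hz
    simp only [Finset.mem_filter] at hz ⊢
    exact ⟨hz.1, fun h => hz.2 (by simp [PySem.Set.mem_add, h])⟩
  · intro hsub
    have hcmem : c ∈ ((x, y) :: gridCells M).toFinset.filter (fun z => z ∉ vis) := by
      simp only [Finset.mem_filter, List.mem_toFinset]
      exact ⟨hmem, hc⟩
    have := hsub hcmem
    simp only [Finset.mem_filter] at this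
    exact this.2 (by simp [PySem.Set.mem_add])

theorem UB_le {M x y} {vis : List (Int × Int)} :
    UB M x y vis ≤ 1 + (gridCells M).length := by
  calc UB M x y vis ≤ ((x, y) :: gridCells M).toFinset.card :=
        Finset.card_le_card (Finset.filter_subset _ _)
    _ ≤ ((x, y) :: gridCells M).length := List.toFinset_card_le _
    _ = 1 + (gridCells M).length := by simp [Nat.add_comm]

-- the one-step exchange: processing c first and exploring from the enlarged avoid set
-- covers the same cells as reaching from c or from the remaining worklist L
theorem step_reach {M} {vis : List (Int × Int)} {c : Int × Int} (hc : c ∉ vis)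
    (L : List (Int × Int)) (u : Int × Int) :
    (u = c ∨ (∃ n ∈ succE M c ((hgt? M c).getD 0), Rch M (fun z => z = c ∨ z ∈ vis) n u) ∨
        ∃ n ∈ L, Rch M (fun z => z = c ∨ z ∈ vis) n u) ↔
      (Rch M (· ∈ vis) c u ∨ ∃ n ∈ L, Rch M (· ∈ vis) n u) := by
  constructor
  · rintro (rfl | ⟨n, hn, hr⟩ | ⟨n, hn, hr⟩)
    · exact Or.inl (Rch.refl u hc)
    · exact Or.inl ((Rch_unfold hc).2 (Or.inr ⟨n, hn, hr⟩))
    · exact Or.inr ⟨n, hn, Rch_mono (fun z hz => Or.inr hz) hr⟩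
  · rintro (hr | ⟨n, hn, hr⟩)
    · rcases (Rch_unfold hc).1 hr with h | h
      · exact Or.inl h
      · exact Or.inr (Or.inl h)
    · rcases Rch_split hr c with h | h | h
      · exact Or.inr (Or.inr ⟨n, hn, h⟩)
      · exact Or.inl h
      · exact Or.inr (Or.inl h)

-- avoid-set bookkeeping: membership in Set.add as the predicate used by Rch
theorem rch_add_congr {M} {vis : List (Int × Int)} {c a u : Int × Int} :
    Rch M (· ∈ PySem.Set.add vis c) a u ↔ Rch M (fun z => z = c ∨ z ∈ vis) a u :=
  Rch_congr (fun z => by simp [PySem.Set.mem_add, or_comm])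

-- the processed stack of A covers exactly: c itself, plus reachability from the old stack
theorem stackA_iff {M} {vis : List (Int × Int)} {c : Int × Int} {h : Int}
    {rest : List ((Int × Int) × Int)} (hc : c ∉ vis) (hwfc : h = (hgt? M c).getD 0)
    (u : Int × Int) :
    (u = c ∨ ∃ p ∈ (dfsPushes M c h (PySem.Set.add vis c)).reverse ++ rest,
        Rch M (· ∈ PySem.Set.add vis c) p.1 u) ↔
      ∃ p ∈ ((c, h) :: rest), Rch M (· ∈ vis) p.1 u := by
  have key := step_reach (M := M) hc (rest.map Prod.fst) u
  constructor
  · rintro (rfl | ⟨p, hp, hr⟩)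
    · exact ⟨(u, h), List.mem_cons_self, Rch.refl u hc⟩
    · rcases List.mem_append.1 hp with hp' | hp'
      · have hm := mem_dfsPushes.1 (List.mem_reverse.1 hp')
        have : Rch M (· ∈ vis) c u := (Rch_unfold hc).2 (Or.inr ⟨p.1, hwfc ▸ hm.1,
          rch_add_congr.1 hr⟩)
        exact ⟨(c, h), List.mem_cons_self, this⟩
      · rcases key.1 (Or.inr (Or.inr ⟨p.1, List.mem_map_of_mem hp', rch_add_congr.1 hr⟩)) with
          hr' | ⟨n, hn, hr'⟩
        · exact ⟨(c, h), List.mem_cons_self, hr'⟩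
        · rcases List.mem_map.1 hn with ⟨q, hq, rfl⟩
          exact ⟨q, List.mem_cons_of_mem _ hq, hr'⟩
  · rintro ⟨p, hp, hr⟩
    rcases List.mem_cons.1 hp with rfl | hp'
    · rcases key.2 (Or.inl hr) with h' | ⟨n, hn, hr'⟩ | ⟨n, hn, hr'⟩
      · exact Or.inl h'
      · refine Or.inr ⟨(n, (hgt? M n).getD 0), List.mem_append.2 (Or.inl
          (List.mem_reverse.2 (mem_dfsPushes.2 ⟨hwfc ▸ hn, ?_, rfl⟩))), rch_add_congr.2 hr'⟩
        have := Rch_not_avoid hr'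
        simp only [PySem.Set.mem_add]
        rintro (h | h)
        · exact this (Or.inr h)
        · exact this (Or.inl h)
      · rcases List.mem_map.1 hn with ⟨q, hq, rfl⟩
        exact Or.inr ⟨q, List.mem_append.2 (Or.inr hq), rch_add_congr.2 hr'⟩
    · rcases key.2 (Or.inr ⟨p.1, List.mem_map_of_mem hp', hr⟩) with h' | ⟨n, hn, hr'⟩ | ⟨n, hn, hr'⟩
      · exact Or.inl h'
      · refine Or.inr ⟨(n, (hgt? M n).getD 0), List.mem_append.2 (Or.inl
          (List.mem_reverse.2 (mem_dfsPushes.2 ⟨hwfc ▸ hn, ?_, rfl⟩))), rch_add_congr.2 hr'⟩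
        have := Rch_not_avoid hr'
        simp only [PySem.Set.mem_add]
        rintro (h | h)
        · exact this (Or.inr h)
        · exact this (Or.inl h)
      · rcases List.mem_map.1 hn with ⟨q, hq, rfl⟩
        exact Or.inr ⟨q, List.mem_append.2 (Or.inr hq), rch_add_congr.2 hr'⟩

-- ===== charA: characterisation of A's loop =====
theorem charA (M : List (List Int)) :
    ∀ f stack (vis nines : PySem.Set (Int × Int)),
      (∀ p ∈ stack, p.2 = (hgt? M p.1).getD 0 ∧ inGrid M p.1 = true) →
      stack.length + 4 * UA M stack vis ≤ f →
      (∀ u, u ∈ (dfsLoop M f stack vis nines).1 ↔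
          u ∈ vis ∨ ∃ p ∈ stack, Rch M (· ∈ vis) p.1 u) ∧
      (∀ u, u ∈ (dfsLoop M f stack vis nines).2 ↔
          u ∈ nines ∨ (hgt? M u = some 9 ∧ ∃ p ∈ stack, Rch M (· ∈ vis) p.1 u)) ∧
      (nines.Nodup → (dfsLoop M f stack vis nines).2.Nodup) := by
  intro f
  induction f with
  | zero =>
    intro stack vis nines hwf hfuel
    match stack with
    | [] => simp [dfsLoop]
    | p :: rest => simp [List.length_cons] at hfuel
  | succ f IH =>
    intro stack vis nines hwf hfuel
    match stack with
    | [] => simp [dfsLoop]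
    | (c, h) :: rest =>
      by_cases hcv : c ∈ vis
      · rw [show dfsLoop M (f + 1) ((c, h) :: rest) vis nines = dfsLoop M f rest vis nines
          from by simp [dfsLoop, hcv]]
        have hfuel' : rest.length + 4 * UA M rest vis ≤ f := by
          have h1 := UA_skip (M := M) (p := (c, h)) (rest := rest) (vis := vis)
          simp only [List.length_cons] at hfuel
          omega
        obtain ⟨h1, h2, h3⟩ := IH rest vis nines
          (fun p hp => hwf p (List.mem_cons_of_mem _ hp)) hfuel'
        have hdead : ∀ u, ¬ Rch M (· ∈ vis) c u := fun u hr => Rch_not_avoid hr hcv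
        have hstk : ∀ u, (∃ p ∈ ((c, h) :: rest), Rch M (· ∈ vis) p.1 u) ↔
            (∃ p ∈ rest, Rch M (· ∈ vis) p.1 u) := by
          intro u
          constructor
          · rintro ⟨p, hp, hr⟩
            rcases List.mem_cons.1 hp with rfl | hp'
            · exact absurd hr (hdead u)
            · exact ⟨p, hp', hr⟩
          · rintro ⟨p, hp, hr⟩
            exact ⟨p, List.mem_cons_of_mem _ hp, hr⟩
        refine ⟨fun u => ?_, fun u => ?_, h3⟩
        · rw [h1 u, hstk u]
        · rw [h2 u, hstk u]
      · rw [show dfsLoop M (f + 1) ((c, h) :: rest) vis nines =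
            dfsLoop M f ((dfsPushes M c h (PySem.Set.add vis c)).reverse ++ rest)
              (PySem.Set.add vis c)
              (if hgt? M c = some 9 then PySem.Set.add nines c else nines)
          from by simp [dfsLoop, hcv]]
        have hwfc := hwf (c, h) List.mem_cons_self
        have hwf' : ∀ p ∈ (dfsPushes M c h (PySem.Set.add vis c)).reverse ++ rest,
            p.2 = (hgt? M p.1).getD 0 ∧ inGrid M p.1 = true := by
          intro p hp
          rcases List.mem_append.1 hp with hp' | hp'
          · have hm := mem_dfsPushes.1 (List.mem_reverse.1 hp')
            exact ⟨hm.2.2, succE_inGrid hm.1⟩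
          · exact hwf p (List.mem_cons_of_mem _ hp')
        have hfuel' : ((dfsPushes M c h (PySem.Set.add vis c)).reverse ++ rest).length +
            4 * UA M ((dfsPushes M c h (PySem.Set.add vis c)).reverse ++ rest)
              (PySem.Set.add vis c) ≤ f := by
          have hlt := UA_step (M := M) (c := c) (h := h) (rest := rest) (vis := vis) hcv
          have hpl : (dfsPushes M c h (PySem.Set.add vis c)).length ≤ 4 :=
            List.length_filterMap_le _ _
          simp only [List.length_append, List.length_reverse, List.length_cons] at hfuel ⊢
          omega
        obtain ⟨h1, h2, h3⟩ := IH ((dfsPushes M c h (PySem.Set.add vis c)).reverse ++ rest)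
          (PySem.Set.add vis c)
          (if hgt? M c = some 9 then PySem.Set.add nines c else nines) hwf' hfuel'
        have hnines : ∀ u, u ∈ (if hgt? M c = some 9 then PySem.Set.add nines c else nines) ↔
            u ∈ nines ∨ (hgt? M c = some 9 ∧ u = c) := by
          intro u
          split_ifs with h9
          · simp [PySem.Set.mem_add, h9]
          · simp [h9]
        refine ⟨fun u => ?_, fun u => ?_, fun hnd => h3 (by
          split_ifs with h9
          exacts [PySem.Set.nodup_add _ _ hnd, hnd])⟩
        · rw [h1 u]
          rw [show (u ∈ PySem.Set.add vis c) = (u ∈ vis ∨ u = c) from by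
            simp [PySem.Set.mem_add]]
          constructor
          · rintro ((h' | h') | h')
            · exact Or.inl h'
            · exact Or.inr ((stackA_iff hcv hwfc.1 u).1 (Or.inl h'))
            · exact Or.inr ((stackA_iff hcv hwfc.1 u).1 (Or.inr h'))
          · rintro (h' | h')
            · exact Or.inl (Or.inl h')
            · rcases (stackA_iff hcv hwfc.1 u).2 h' with h'' | h''
              · exact Or.inl (Or.inr h'')
              · exact Or.inr h''
        · rw [h2 u, hnines u]
          constructor
          · rintro ((h' | ⟨h9, rfl⟩) | ⟨h9u, h'⟩)
            · exact Or.inl h'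
            · exact Or.inr ⟨h9, (stackA_iff hcv hwfc.1 u).1 (Or.inl rfl)⟩
            · exact Or.inr ⟨h9u, (stackA_iff hcv hwfc.1 u).1 (Or.inr h')⟩
          · rintro (h' | ⟨h9u, h'⟩)
            · exact Or.inl (Or.inl h')
            · rcases (stackA_iff hcv hwfc.1 u).2 h' with h'' | h''
              · exact Or.inl (Or.inr ⟨h'' ▸ h9u, h''⟩)
              · exact Or.inr ⟨h9u, h''⟩

-- ===== charB: characterisation of B's recursion =====
theorem charB (M : List (List Int)) (x y : Int) :
    ∀ f (c : Int × Int) (e : Int) (s : PySem.Set (Int × Int) × PySem.Set (Int × Int)),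
      c ∉ s.1 → c ∈ (x, y) :: gridCells M → UB M x y s.1 ≤ f →
      (∀ u, u ∈ (dfsVisit M f c e s).1 ↔
          u ∈ s.1 ∨ u = c ∨ ∃ n ∈ succE M c e, Rch M (fun z => z = c ∨ z ∈ s.1) n u) ∧
      (∀ u, u ∈ (dfsVisit M f c e s).2 ↔
          u ∈ s.2 ∨ (hgt? M u = some 9 ∧
            (u = c ∨ ∃ n ∈ succE M c e, Rch M (fun z => z = c ∨ z ∈ s.1) n u))) ∧
      (s.2.Nodup → (dfsVisit M f c e s).2.Nodup) := by
  intro f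
  induction f with
  | zero =>
    intro c e s hc hmem hfuel
    have : 0 < UB M x y s.1 :=
      Finset.card_pos.mpr ⟨c, by simp only [Finset.mem_filter, List.mem_toFinset]; exact ⟨hmem, hc⟩⟩
    omega
  | succ f IH =>
    intro c e s hc hmem hfuel
    obtain ⟨vis, nines⟩ := s
    simp only at hc hfuel
    have hstep : dfsVisit M (f + 1) c e (vis, nines) =
        dfsGo M f [((-1 : Int), (0 : Int)), (1, 0), (0, -1), (0, 1)] c e
          (PySem.Set.add vis c,
            if hgt? M c = some 9 then PySem.Set.add nines c else nines) := by
      simp [dfsVisit]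
    have go : ∀ ds (t : PySem.Set (Int × Int) × PySem.Set (Int × Int)),
        UB M x y t.1 ≤ f →
        (∀ u, u ∈ (dfsGo M f ds c e t).1 ↔
            u ∈ t.1 ∨ ∃ d ∈ ds,
              ((inGrid M (c.1 + d.1, c.2 + d.2) = true ∧
                hgt? M (c.1 + d.1, c.2 + d.2) = some (e + 1)) ∧
                Rch M (· ∈ t.1) (c.1 + d.1, c.2 + d.2) u)) ∧
        (∀ u, u ∈ (dfsGo M f ds c e t).2 ↔
            u ∈ t.2 ∨ (hgt? M u = some 9 ∧ ∃ d ∈ ds,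
              ((inGrid M (c.1 + d.1, c.2 + d.2) = true ∧
                hgt? M (c.1 + d.1, c.2 + d.2) = some (e + 1)) ∧
                Rch M (· ∈ t.1) (c.1 + d.1, c.2 + d.2) u))) ∧
        (t.2.Nodup → (dfsGo M f ds c e t).2.Nodup) := by
      intro ds
      induction ds with
      | nil => intro t ht; simp [dfsGo]
      | cons d ds ihds =>
        intro t ht
        rw [show dfsGo M f (d :: ds) c e t = dfsGo M f ds c e
            (if inGrid M (c.1 + d.1, c.2 + d.2) ∧ (c.1 + d.1, c.2 + d.2) ∉ t.1 ∧
                hgt? M (c.1 + d.1, c.2 + d.2) = some (e + 1) then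
              dfsVisit M f (c.1 + d.1, c.2 + d.2) ((hgt? M (c.1 + d.1, c.2 + d.2)).getD 0) t
            else t) from by simp [dfsGo]]
        by_cases hcond : inGrid M (c.1 + d.1, c.2 + d.2) ∧ (c.1 + d.1, c.2 + d.2) ∉ t.1 ∧
            hgt? M (c.1 + d.1, c.2 + d.2) = some (e + 1)
        · rw [if_pos hcond]
          have hnmem : (c.1 + d.1, c.2 + d.2) ∈ (x, y) :: gridCells M :=
            List.mem_cons_of_mem _ (mem_gridCells hcond.1)
          obtain ⟨v1, v2, v3⟩ := IH (c.1 + d.1, c.2 + d.2)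
            ((hgt? M (c.1 + d.1, c.2 + d.2)).getD 0) t hcond.2.1 hnmem ht
          have hsub : ∀ z, z ∈ t.1 →
              z ∈ (dfsVisit M f (c.1 + d.1, c.2 + d.2)
                ((hgt? M (c.1 + d.1, c.2 + d.2)).getD 0) t).1 :=
            fun z hz => (v1 z).2 (Or.inl hz)
          have ht' : UB M x y (dfsVisit M f (c.1 + d.1, c.2 + d.2)
              ((hgt? M (c.1 + d.1, c.2 + d.2)).getD 0) t).1 ≤ f :=
            le_trans (UB_sub hsub) ht
          obtain ⟨g1, g2, g3⟩ := ihds (dfsVisit M f (c.1 + d.1, c.2 + d.2)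
            ((hgt? M (c.1 + d.1, c.2 + d.2)).getD 0) t) ht'
          have hreach : ∀ z, (z = (c.1 + d.1, c.2 + d.2) ∨
              ∃ m ∈ succE M (c.1 + d.1, c.2 + d.2)
                ((hgt? M (c.1 + d.1, c.2 + d.2)).getD 0),
                Rch M (fun w => w = (c.1 + d.1, c.2 + d.2) ∨ w ∈ t.1) m z) ↔
              Rch M (· ∈ t.1) (c.1 + d.1, c.2 + d.2) z := fun z =>
            (Rch_unfold hcond.2.1).symm
          have hw : ∀ z, z ∈ (dfsVisit M f (c.1 + d.1, c.2 + d.2)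
              ((hgt? M (c.1 + d.1, c.2 + d.2)).getD 0) t).1 ↔
              (z ∈ t.1 ∨ Rch M (· ∈ t.1) (c.1 + d.1, c.2 + d.2) z) := by
            intro z
            rw [v1 z]
            constructor
            · rintro (hz | hz)
              · exact Or.inl hz
              · exact Or.inr ((hreach z).1 hz)
            · rintro (hz | hz)
              · exact Or.inl hz
              · exact Or.inr ((hreach z).2 hz)
          refine ⟨fun u => ?_, fun u => ?_, fun hnd => g3 (v3 hnd)⟩
          · rw [g1 u]
            constructor
            · rintro (hu | ⟨d', hd', hcond', hr⟩)
              · rcases (hw u).1 hu with hu' | hr'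
                · exact Or.inl hu'
                · exact Or.inr ⟨d, List.mem_cons_self, ⟨hcond.1, hcond.2.2⟩, hr'⟩
              · exact Or.inr ⟨d', List.mem_cons_of_mem _ hd', hcond', Rch_mono hsub hr⟩
            · rintro (hu | ⟨d', hd', hcond', hr⟩)
              · exact Or.inl ((hw u).2 (Or.inl hu))
              · rcases List.mem_cons.1 hd' with rfl | hd''
                · exact Or.inl ((hw u).2 (Or.inr hr))
                · rcases Rch_absorb hw hr with h' | h'
                  · exact Or.inr ⟨d', hd'', hcond', h'⟩
                  · exact Or.inl ((hw u).2 (Or.inr h'))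
          · rw [g2 u]
            have hv2 : ∀ z, z ∈ (dfsVisit M f (c.1 + d.1, c.2 + d.2)
                ((hgt? M (c.1 + d.1, c.2 + d.2)).getD 0) t).2 ↔
                (z ∈ t.2 ∨ (hgt? M z = some 9 ∧
                  Rch M (· ∈ t.1) (c.1 + d.1, c.2 + d.2) z)) := by
              intro z
              rw [v2 z]
              constructor
              · rintro (hz | ⟨h9, hz⟩)
                · exact Or.inl hz
                · exact Or.inr ⟨h9, (hreach z).1 hz⟩
              · rintro (hz | ⟨h9, hz⟩)
                · exact Or.inl hz
                · exact Or.inr ⟨h9, (hreach z).2 hz⟩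
            constructor
            · rintro (hu | ⟨h9u, d', hd', hcond', hr⟩)
              · rcases (hv2 u).1 hu with hu' | ⟨h9, hr'⟩
                · exact Or.inl hu'
                · exact Or.inr ⟨h9, d, List.mem_cons_self, ⟨hcond.1, hcond.2.2⟩, hr'⟩
              · exact Or.inr ⟨h9u, d', List.mem_cons_of_mem _ hd', hcond', Rch_mono hsub hr⟩
            · rintro (hu | ⟨h9u, d', hd', hcond', hr⟩)
              · exact Or.inl ((hv2 u).2 (Or.inl hu))
              · rcases List.mem_cons.1 hd' with rfl | hd''
                · exact Or.inl ((hv2 u).2 (Or.inr ⟨h9u, hr⟩))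
                · rcases Rch_absorb hw hr with h' | h'
                  · exact Or.inr ⟨h9u, d', hd'', hcond', h'⟩
                  · exact Or.inl ((hv2 u).2 (Or.inr ⟨h9u, h'⟩))
        · rw [if_neg hcond]
          obtain ⟨g1, g2, g3⟩ := ihds t ht
          have hdead : ∀ u d', d' ∈ [d] → ¬ (((inGrid M (c.1 + d'.1, c.2 + d'.2) = true ∧
              hgt? M (c.1 + d'.1, c.2 + d'.2) = some (e + 1)) ∧
              Rch M (· ∈ t.1) (c.1 + d'.1, c.2 + d'.2) u)) := by
            rintro u d' hd' ⟨⟨hin, hh⟩, hr⟩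
            rcases List.mem_singleton.1 hd' with rfl
            exact hcond ⟨hin, Rch_not_avoid hr, hh⟩
          refine ⟨fun u => ?_, fun u => ?_, g3⟩
          · rw [g1 u]
            constructor
            · rintro (hu | ⟨d', hd', hx⟩)
              · exact Or.inl hu
              · exact Or.inr ⟨d', List.mem_cons_of_mem _ hd', hx⟩
            · rintro (hu | ⟨d', hd', hx⟩)
              · exact Or.inl hu
              · rcases List.mem_cons.1 hd' with rfl | hd''
                · exact absurd hx (hdead u d' (List.mem_singleton.2 rfl))
                · exact Or.inr ⟨d', hd'', hx⟩
          · rw [g2 u]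
            constructor
            · rintro (hu | ⟨h9u, d', hd', hx⟩)
              · exact Or.inl hu
              · exact Or.inr ⟨h9u, d', List.mem_cons_of_mem _ hd', hx⟩
            · rintro (hu | ⟨h9u, d', hd', hx⟩)
              · exact Or.inl hu
              · rcases List.mem_cons.1 hd' with rfl | hd''
                · exact absurd hx (hdead u d' (List.mem_singleton.2 rfl))
                · exact Or.inr ⟨h9u, d', hd'', hx⟩
    rw [hstep]
    have hfuel' : UB M x y (PySem.Set.add vis c,
        if hgt? M c = some 9 then PySem.Set.add nines c else nines).1 ≤ f := by
      have := UB_dec (M := M) (x := x) (y := y) (vis := vis) hmem hc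
      simp only at this ⊢
      omega
    obtain ⟨g1, g2, g3⟩ := go [((-1 : Int), (0 : Int)), (1, 0), (0, -1), (0, 1)]
      (PySem.Set.add vis c, if hgt? M c = some 9 then PySem.Set.add nines c else nines) hfuel'
    have hse : ∀ (P : (Int × Int) → Prop),
        (∃ n ∈ succE M c e, P n) ↔ ∃ d ∈ [((-1 : Int), (0 : Int)), (1, 0), (0, -1), (0, 1)],
          ((inGrid M (c.1 + d.1, c.2 + d.2) = true ∧
            hgt? M (c.1 + d.1, c.2 + d.2) = some (e + 1)) ∧ P (c.1 + d.1, c.2 + d.2)) := by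
      intro P
      constructor
      · rintro ⟨n, hn, hP⟩
        rcases mem_succE.1 hn with ⟨d, hd, hcond, rfl⟩
        exact ⟨d, hd, hcond, hP⟩
      · rintro ⟨d, hd, hcond, hP⟩
        exact ⟨(c.1 + d.1, c.2 + d.2), mem_succE.2 ⟨d, hd, hcond, rfl⟩, hP⟩
    have hnines : ∀ u, u ∈ (if hgt? M c = some 9 then PySem.Set.add nines c else nines) ↔
        u ∈ nines ∨ (hgt? M c = some 9 ∧ u = c) := by
      intro u
      split_ifs with h9
      · simp [PySem.Set.mem_add, h9]
      · simp [h9]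
    refine ⟨fun u => ?_, fun u => ?_, fun hnd => g3 (by
      simp only
      split_ifs with h9
      exacts [PySem.Set.nodup_add _ _ hnd, hnd])⟩
    have hcg : ∀ a u, Rch M (fun x => x ∈ vis ∨ x = c) a u ↔
        Rch M (fun z => z = c ∨ z ∈ vis) a u := fun a u => Rch_congr (fun z => or_comm)
    · rw [g1 u]
      simp only [PySem.Set.mem_add]
      constructor
      · rintro ((hu | rfl) | hx)
        · exact Or.inl hu
        · exact Or.inr (Or.inl rfl)
        · refine Or.inr (Or.inr ((hse _).2 ?_))
          obtain ⟨d, hd, hcond, hr⟩ := hx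
          exact ⟨d, hd, hcond, (hcg _ _).1 hr⟩
      · rintro (hu | rfl | hx)
        · exact Or.inl (Or.inl hu)
        · exact Or.inl (Or.inr rfl)
        · obtain ⟨d, hd, hcond, hr⟩ := (hse _).1 hx
          exact Or.inr ⟨d, hd, hcond, (hcg _ _).2 hr⟩
    · rw [g2 u, hnines u]
      constructor
      · rintro ((hu | ⟨h9c, rfl⟩) | ⟨h9u, hx⟩)
        · exact Or.inl hu
        · exact Or.inr ⟨h9c, Or.inl rfl⟩
        · refine Or.inr ⟨h9u, Or.inr ((hse _).2 ?_)⟩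
          obtain ⟨d, hd, hcond, hr⟩ := hx
          exact ⟨d, hd, hcond, rch_add_congr.1 hr⟩
      · rintro (hu | ⟨h9u, rfl | hx⟩)
        · exact Or.inl (Or.inl hu)
        · exact Or.inl (Or.inr ⟨h9u, rfl⟩)
        · obtain ⟨d, hd, hcond, hr⟩ := (hse _).1 hx
          exact Or.inr ⟨h9u, d, hd, hcond, rch_add_congr.2 hr⟩

-- ===== VERDICT (by name: the statement is the Claim_ definition above) =====
theorem dfs_spec : Claim_equal_dfs := by
  unfold Claim_equal_dfs
  intro M x y visited hdom hpre
  unfold Spec_dfs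
  by_cases hv : (x, y) ∈ visited
  · have hA : dfs M x y visited = 0 := by
      unfold dfs
      rw [show 4 * (M.length * (M.headD []).length) + 5 =
        (4 * (M.length * (M.headD []).length) + 4) + 1 from by omega]
      rw [show dfsLoop M ((4 * (M.length * (M.headD []).length) + 4) + 1) [((x, y), 0)]
          visited PySem.Set.empty =
          dfsLoop M (4 * (M.length * (M.headD []).length) + 4) [] visited PySem.Set.empty
        from by simp [dfsLoop, hv]]
      simp [dfsLoop, PySem.Set.len, PySem.Set.empty]
    have hB : dfs_alt M x y visited = 0 := by
      unfold dfs_alt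
      simp [hv, PySem.Set.len, PySem.Set.empty]
    rw [hA, hB]
  · rcases hpre with hpre | hpre
    · exact absurd hpre hv
    have hA1 : dfsLoop M (4 * (M.length * (M.headD []).length) + 5) [((x, y), 0)] visited
        PySem.Set.empty =
        dfsLoop M (4 * (M.length * (M.headD []).length) + 4)
          ((dfsPushes M (x, y) 0 (PySem.Set.add visited (x, y))).reverse)
          (PySem.Set.add visited (x, y))
          (if hgt? M (x, y) = some 9 then PySem.Set.add PySem.Set.empty (x, y)
            else PySem.Set.empty) := by
      rw [show 4 * (M.length * (M.headD []).length) + 5 =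
        (4 * (M.length * (M.headD []).length) + 4) + 1 from by omega]
      simp [dfsLoop, hv]
    have hwf1 : ∀ p ∈ (dfsPushes M (x, y) 0 (PySem.Set.add visited (x, y))).reverse,
        p.2 = (hgt? M p.1).getD 0 ∧ inGrid M p.1 = true := by
      intro p hp
      rw [List.mem_reverse] at hp
      have hm := mem_dfsPushes.1 hp
      exact ⟨hm.2.2, succE_inGrid hm.1⟩
    have hfuel1 : ((dfsPushes M (x, y) 0 (PySem.Set.add visited (x, y))).reverse).length +
        4 * UA M ((dfsPushes M (x, y) 0 (PySem.Set.add visited (x, y))).reverse)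
          (PySem.Set.add visited (x, y)) ≤ 4 * (M.length * (M.headD []).length) + 4 := by
      have hpl : (dfsPushes M (x, y) 0 (PySem.Set.add visited (x, y))).length ≤ 4 :=
        List.length_filterMap_le _ _
      have hua : UA M ((dfsPushes M (x, y) 0 (PySem.Set.add visited (x, y))).reverse)
          (PySem.Set.add visited (x, y)) ≤ (gridCells M).length :=
        UA_le_grid (fun z hz => by
          rcases List.mem_map.1 hz with ⟨p, hp, rfl⟩
          exact mem_gridCells (hwf1 p hp).2)
      rw [gridCells_length] at hua
      rw [List.length_reverse]
      omega
    obtain ⟨hAv, hAn, hAnd⟩ := charA M (4 * (M.length * (M.headD []).length) + 4)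
      ((dfsPushes M (x, y) 0 (PySem.Set.add visited (x, y))).reverse)
      (PySem.Set.add visited (x, y))
      (if hgt? M (x, y) = some 9 then PySem.Set.add PySem.Set.empty (x, y)
        else PySem.Set.empty) hwf1 hfuel1
    have hfuelB : UB M x y visited ≤ M.length * (M.headD []).length + 2 := by
      have := UB_le (M := M) (x := x) (y := y) (vis := visited)
      rw [gridCells_length] at this
      omega
    obtain ⟨hBv, hBn, hBnd⟩ := charB M x y (M.length * (M.headD []).length + 2) (x, y) 0
      (visited, PySem.Set.empty) hv List.mem_cons_self hfuelB
    have hmemiff : ∀ u,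
        u ∈ (dfsLoop M (4 * (M.length * (M.headD []).length) + 4)
          ((dfsPushes M (x, y) 0 (PySem.Set.add visited (x, y))).reverse)
          (PySem.Set.add visited (x, y))
          (if hgt? M (x, y) = some 9 then PySem.Set.add PySem.Set.empty (x, y)
            else PySem.Set.empty)).2 ↔
        u ∈ (dfsVisit M (M.length * (M.headD []).length + 2) (x, y) 0
          (visited, PySem.Set.empty)).2 := by
      intro u
      rw [hAn u, hBn u]
      have hstk : (∃ p ∈ (dfsPushes M (x, y) 0 (PySem.Set.add visited (x, y))).reverse,
          Rch M (· ∈ PySem.Set.add visited (x, y)) p.1 u) ↔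
          (∃ n ∈ succE M (x, y) 0, Rch M (fun z => z = (x, y) ∨ z ∈ visited) n u) := by
        constructor
        · rintro ⟨p, hp, hr⟩
          rw [List.mem_reverse] at hp
          have hm := mem_dfsPushes.1 hp
          exact ⟨p.1, hm.1, rch_add_congr.1 hr⟩
        · rintro ⟨n, hn, hr⟩
          refine ⟨(n, (hgt? M n).getD 0), ?_, rch_add_congr.2 hr⟩
          rw [List.mem_reverse]
          refine mem_dfsPushes.2 ⟨hn, ?_, rfl⟩
          have := Rch_not_avoid hr
          simp only [PySem.Set.mem_add]
          rintro (h | h)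
          · exact this (Or.inr h)
          · exact this (Or.inl h)
      have hn1 : ∀ z : Int × Int,
          z ∈ (if hgt? M (x, y) = some 9 then PySem.Set.add PySem.Set.empty (x, y)
            else PySem.Set.empty) ↔ (hgt? M (x, y) = some 9 ∧ z = (x, y)) := by
        intro z
        split_ifs with h9
        · simp [PySem.Set.add, PySem.Set.empty, PySem.Set.contains, h9]
        · simp [PySem.Set.empty, h9]
      constructor
      · rintro (hz | ⟨h9u, hx⟩)
        · rcases (hn1 u).1 hz with ⟨h9, rfl⟩
          exact Or.inr ⟨h9, Or.inl rfl⟩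
        · exact Or.inr ⟨h9u, Or.inr (hstk.1 hx)⟩
      · rintro (hz | ⟨h9u, heq | hx⟩)
        · simp [PySem.Set.empty] at hz
        · exact Or.inl ((hn1 u).2 ⟨heq ▸ h9u, heq⟩)
        · exact Or.inr ⟨h9u, hstk.2 hx⟩
    have hndA : (dfsLoop M (4 * (M.length * (M.headD []).length) + 4)
        ((dfsPushes M (x, y) 0 (PySem.Set.add visited (x, y))).reverse)
        (PySem.Set.add visited (x, y))
        (if hgt? M (x, y) = some 9 then PySem.Set.add PySem.Set.empty (x, y)
          else PySem.Set.empty)).2.Nodup := hAnd (by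
      split_ifs with h9
      · exact PySem.Set.nodup_add _ _ List.nodup_nil
      · exact List.nodup_nil)
    have hndB : (dfsVisit M (M.length * (M.headD []).length + 2) (x, y) 0
        (visited, PySem.Set.empty)).2.Nodup := hBnd List.nodup_nil
    have hlen : (dfsLoop M (4 * (M.length * (M.headD []).length) + 4)
        ((dfsPushes M (x, y) 0 (PySem.Set.add visited (x, y))).reverse)
        (PySem.Set.add visited (x, y))
        (if hgt? M (x, y) = some 9 then PySem.Set.add PySem.Set.empty (x, y)
          else PySem.Set.empty)).2.length =
        (dfsVisit M (M.length * (M.headD []).length + 2) (x, y) 0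
          (visited, PySem.Set.empty)).2.length := by
      rw [← List.toFinset_card_of_nodup hndA, ← List.toFinset_card_of_nodup hndB]
      congr 1
      apply Finset.ext
      intro z
      simp only [List.mem_toFinset]
      exact hmemiff z
    have hA : dfs M x y visited = PySem.Set.len (dfsLoop M
        (4 * (M.length * (M.headD []).length) + 4)
        ((dfsPushes M (x, y) 0 (PySem.Set.add visited (x, y))).reverse)
        (PySem.Set.add visited (x, y))
        (if hgt? M (x, y) = some 9 then PySem.Set.add PySem.Set.empty (x, y)
          else PySem.Set.empty)).2 := by
      unfold dfs
      rw [hA1]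
    have hB : dfs_alt M x y visited = PySem.Set.len
        (dfsVisit M (M.length * (M.headD []).length + 2) (x, y) 0
          (visited, PySem.Set.empty)).2 := by
      unfold dfs_alt
      simp [hv]
    rw [hA, hB]
    unfold PySem.Set.len
    exact congrArg (fun n : Nat => (n : Int)) hlen
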